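-- pv_equiv track=rewrite | github.com/shlok923/ocean | q50.py | dir_pattern
-- ===== SOURCE A (Python) =====
-- def change(s,L):             #to change coordinates according to clockwise and anti-clockwise.
-- 	cs=''                    #for example, for clockwise D-L are exchanged
-- 	for i in s:              #if even index, add next element to new string. otherwise, add previous element
-- 		ind=L.index(i)       #check index of element
-- 		if ind%2==0:
-- 			cs+=L[ind+1]
-- 		else:
-- 			cs+=L[ind-1]
-- 	return cs                #return changed string
--
-- def anticlock(s):            #anticlock rotate function
-- 	L=['L','U','D','R']      # L-U and D-R interchange
-- 	return change(s,L)
--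
-- def clock(s):
-- 	L=['R','U','D','L']      # R-U and D-L interchange
-- 	return change(s,L)
--
-- def dir_pattern(n: int):         #main directional pattern function
-- 	pattern='DRU'            #starting point
-- 	i=1                      #variable for loop
-- 	if n==1:                 #return starting pattern for n=1
-- 		return pattern
-- 	else:
-- 		while i<n:
-- 		   i+=1
-- 		   pattern=anticlock(pattern)+'D'+pattern+'R'+pattern+'U'+clock(pattern)     #else, algorithm is to rotate anticlock, connect to original, connect to original, connect to clock
-- 	return pattern                                                                   #return resultant pattern
-- ===== SOURCE B (Python) =====
-- _ANTI = str.maketrans('LUDR', 'ULRD')   # L<->U, D<->R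
-- _CLOCK = str.maketrans('RUDL', 'URLD')  # R<->U, D<->L
--
-- def dir_pattern(n: int):
--     if n <= 1:
--         return 'DRU'
--     sub = dir_pattern(n - 1)
--     return sub.translate(_ANTI) + 'D' + sub + 'R' + sub + 'U' + sub.translate(_CLOCK)
-- ===== Notes on version B (the rewrite author's own statement) =====
-- stated objective: simpler
-- what changed: Replaces the iterative while-loop with counter i by direct recursion on n exploiting the pattern's self-similarity, and replaces the per-character list.index parity trick by a single str.translate table for each rotation.
import Mathlib
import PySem

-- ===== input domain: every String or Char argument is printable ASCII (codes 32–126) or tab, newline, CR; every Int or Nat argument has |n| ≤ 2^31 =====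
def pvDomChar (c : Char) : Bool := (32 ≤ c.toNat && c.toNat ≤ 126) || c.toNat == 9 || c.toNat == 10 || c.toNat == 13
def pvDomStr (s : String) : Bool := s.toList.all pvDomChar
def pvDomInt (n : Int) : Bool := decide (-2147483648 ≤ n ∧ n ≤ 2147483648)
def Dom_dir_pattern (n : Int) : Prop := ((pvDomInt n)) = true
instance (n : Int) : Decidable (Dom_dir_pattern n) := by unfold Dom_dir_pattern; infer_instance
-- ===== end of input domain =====

-- B replaces A's while-loop and per-character list.index parity trick by direct recursion
-- on n with translate-style character maps (simpler decomposition; same return values).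

-- ===== PORT A =====
-- change(s, L): per character, look up its index in L and take the neighbour of opposite parity.
-- (the `none` branch of index? is Python's ValueError; dir_pattern only ever passes characters of L)
def change (s : String) (L : List Char) : String :=
  String.ofList (s.toList.foldl (fun cs i =>
    match PySem.List.index? L i with
    | none => cs
    | some ind =>
      if PySem.Int.mod ind 2 = 0 then cs ++ [PySem.List.pyGetD L (ind + 1) ' ']
      else cs ++ [PySem.List.pyGetD L (ind - 1) ' ']) [])

def anticlock (s : String) : String := change s ['L', 'U', 'D', 'R']

def clock (s : String) : String := change s ['R', 'U', 'D', 'L']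

def dirLoop (pattern : String) (i n : Int) : String :=
  if i < n then
    dirLoop (anticlock pattern ++ "D" ++ pattern ++ "R" ++ pattern ++ "U" ++ clock pattern)
      (i + 1) n
  else pattern
termination_by (n - i).toNat
decreasing_by omega

def dir_pattern (n : Int) : String :=
  if n = 1 then "DRU" else dirLoop "DRU" 1 n

-- ===== PORT B =====
-- the translate tables of Source B, as character maps (identity outside the table, like str.translate)
def aSwap (c : Char) : Char :=
  if c = 'L' then 'U' else if c = 'U' then 'L' else if c = 'D' then 'R' else if c = 'R' then 'D' else c

def cSwap (c : Char) : Char :=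
  if c = 'R' then 'U' else if c = 'U' then 'R' else if c = 'D' then 'L' else if c = 'L' then 'D' else c

def dir_pattern_alt (n : Int) : String :=
  if n ≤ 1 then "DRU"
  else
    let sub := dir_pattern_alt (n - 1)
    String.ofList (sub.toList.map aSwap) ++ "D" ++ sub ++ "R" ++ sub ++ "U" ++
      String.ofList (sub.toList.map cSwap)
termination_by n.toNat
decreasing_by omega

-- ===== PRECONDITION & SPEC =====
def Spec_dir_pattern (n : Int) (out : String) : Prop := out = dir_pattern_alt n
instance (n : Int) (out : String) : Decidable (Spec_dir_pattern n out) := by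
  unfold Spec_dir_pattern; infer_instance

-- ===== CLAIM (what is proved, stated in full; the proofs are below) =====
def Claim_equal_dir_pattern : Prop := ∀ (n : Int), Dom_dir_pattern n → Spec_dir_pattern n (dir_pattern n)

-- ===== LEMMAS AND PROOFS =====

-- all characters of p are direction letters
def goodL (p : List Char) : Prop := ∀ c ∈ p, c = 'D' ∨ c = 'R' ∨ c = 'U' ∨ c = 'L'

-- A's loop body, as a function on the pattern
def stepA (p : String) : String :=
  anticlock p ++ "D" ++ p ++ "R" ++ p ++ "U" ++ clock p

-- B's combination step, as a function on the pattern
def stepB (p : String) : String :=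
  String.ofList (p.toList.map aSwap) ++ "D" ++ p ++ "R" ++ p ++ "U" ++
    String.ofList (p.toList.map cSwap)

-- A's while loop as Nat-fuel iteration of stepA
def natIter : Nat → String → String
  | 0, p => p
  | k + 1, p => natIter k (stepA p)

lemma change_eq_map (s : String) (L : List Char) (g : Char → Char)
    (h : ∀ c ∈ s.toList, ∀ cs : List Char,
      (match PySem.List.index? L c with
       | none => cs
       | some ind =>
         if PySem.Int.mod ind 2 = 0 then cs ++ [PySem.List.pyGetD L (ind + 1) ' ']
         else cs ++ [PySem.List.pyGetD L (ind - 1) ' ']) = cs ++ [g c]) :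
    change s L = String.ofList (s.toList.map g) := by
  unfold change
  congr 1
  have key : ∀ (p : List Char), (∀ c ∈ p, ∀ cs : List Char,
      (match PySem.List.index? L c with
       | none => cs
       | some ind =>
         if PySem.Int.mod ind 2 = 0 then cs ++ [PySem.List.pyGetD L (ind + 1) ' ']
         else cs ++ [PySem.List.pyGetD L (ind - 1) ' ']) = cs ++ [g c]) →
      ∀ (acc : List Char), p.foldl (fun cs i =>
      match PySem.List.index? L i with
      | none => cs
      | some ind =>
        if PySem.Int.mod ind 2 = 0 then cs ++ [PySem.List.pyGetD L (ind + 1) ' ']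
        else cs ++ [PySem.List.pyGetD L (ind - 1) ' ']) acc = acc ++ p.map g := by
    intro p
    induction p with
    | nil => simp
    | cons x xs ih =>
      intro hp acc
      simp only [List.foldl_cons, List.map_cons]
      rw [hp x (by simp) acc, ih (fun c hc => hp c (by simp [hc])) (acc ++ [g x])]
      simp
  simpa using key s.toList h []

lemma anticlock_good (s : String) (hp : goodL s.toList) :
    anticlock s = String.ofList (s.toList.map aSwap) := by
  apply change_eq_map
  intro c hc cs
  rcases hp c hc with h | h | h | h <;> subst h <;> rfl

lemma clock_good (s : String) (hp : goodL s.toList) :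
    clock s = String.ofList (s.toList.map cSwap) := by
  apply change_eq_map
  intro c hc cs
  rcases hp c hc with h | h | h | h <;> subst h <;> rfl

lemma stepA_eq_stepB (p : String) (hp : goodL p.toList) : stepA p = stepB p := by
  unfold stepA stepB
  rw [show anticlock p = change p ['L', 'U', 'D', 'R'] from rfl,
    show clock p = change p ['R', 'U', 'D', 'L'] from rfl] at *
  rw [← anticlock_good p hp, ← clock_good p hp]
  rfl

lemma aSwap_good (c : Char) (h : c = 'D' ∨ c = 'R' ∨ c = 'U' ∨ c = 'L') :
    aSwap c = 'D' ∨ aSwap c = 'R' ∨ aSwap c = 'U' ∨ aSwap c = 'L' := by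
  rcases h with h | h | h | h <;> subst h <;> simp [aSwap]

lemma cSwap_good (c : Char) (h : c = 'D' ∨ c = 'R' ∨ c = 'U' ∨ c = 'L') :
    cSwap c = 'D' ∨ cSwap c = 'R' ∨ cSwap c = 'U' ∨ cSwap c = 'L' := by
  rcases h with h | h | h | h <;> subst h <;> simp [cSwap]

lemma goodL_stepB (p : String) (hp : goodL p.toList) : goodL (stepB p).toList := by
  unfold stepB
  intro c hc
  simp only [String.toList_append, List.mem_append, String.toList_ofList] at hc
  rcases hc with ((((((h | h) | h) | h) | h) | h) | h)
  · obtain ⟨e, he, rfl⟩ := List.mem_map.mp h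
    exact aSwap_good e (hp e he)
  · simp only [show ("D" : String).toList = ['D'] from rfl, List.mem_singleton] at h
    exact Or.inl h
  · exact hp c h
  · simp only [show ("R" : String).toList = ['R'] from rfl, List.mem_singleton] at h
    exact Or.inr (Or.inl h)
  · exact hp c h
  · simp only [show ("U" : String).toList = ['U'] from rfl, List.mem_singleton] at h
    exact Or.inr (Or.inr (Or.inl h))
  · obtain ⟨e, he, rfl⟩ := List.mem_map.mp h
    exact cSwap_good e (hp e he)

lemma dirLoop_eq_natIter : ∀ (k : Nat) (p : String) (i n : Int), (n - i).toNat = k →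
    dirLoop p i n = natIter k p := by
  intro k
  induction k with
  | zero =>
    intro p i n hk
    unfold dirLoop
    rw [if_neg (by omega)]
    rfl
  | succ k ih =>
    intro p i n hk
    unfold dirLoop
    rw [if_pos (by omega)]
    exact ih _ (i + 1) n (by omega)

lemma natIter_step (k : Nat) (p : String) : natIter k (stepA p) = stepA (natIter k p) := by
  induction k generalizing p with
  | zero => rfl
  | succ k ih => simpa [natIter] using ih (stepA p)

lemma alt_of_le_one (n : Int) (h : n ≤ 1) : dir_pattern_alt n = "DRU" := by
  unfold dir_pattern_alt
  rw [if_pos h]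

lemma alt_succ (m : Int) (h : 1 < m) :
    dir_pattern_alt m = stepB (dir_pattern_alt (m - 1)) := by
  conv_lhs => unfold dir_pattern_alt
  rw [if_neg (by omega)]
  rfl

lemma natIter_eq_alt (k : Nat) :
    natIter k "DRU" = dir_pattern_alt ((k : Int) + 1) ∧ goodL (natIter k "DRU").toList := by
  induction k with
  | zero =>
    refine ⟨by rw [alt_of_le_one _ (by norm_num)]; rfl, ?_⟩
    intro c hc
    have : c = 'D' ∨ c = 'R' ∨ c = 'U' := by
      simpa [natIter, show ("DRU" : String).toList = ['D', 'R', 'U'] from rfl] using hc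
    tauto
  | succ k ih =>
    obtain ⟨heq, hgood⟩ := ih
    have hstep : natIter (k + 1) "DRU" = stepB (natIter k "DRU") := by
      show natIter k (stepA "DRU") = _
      rw [natIter_step, stepA_eq_stepB _ hgood]
    refine ⟨?_, by rw [hstep]; exact goodL_stepB _ hgood⟩
    rw [hstep, heq, alt_succ (((k + 1 : Nat) : Int) + 1) (by push_cast; omega)]
    have : (((k + 1 : Nat) : Int) + 1) - 1 = (k : Int) + 1 := by push_cast; ring
    rw [this]

-- ===== VERDICT (by name: the statement is the Claim_ definition above) =====
theorem dir_pattern_spec : Claim_equal_dir_pattern := by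
  intro n _
  unfold Spec_dir_pattern dir_pattern
  by_cases h1 : n = 1
  · rw [if_pos h1, h1, alt_of_le_one 1 (by omega)]
  · rw [if_neg h1]
    by_cases h2 : n ≤ 1
    · have : ¬ (1 : Int) < n := by omega
      unfold dirLoop
      rw [if_neg this, alt_of_le_one n h2]
    · have hk : ((n - 1).toNat : Int) + 1 = n := by omega
      rw [dirLoop_eq_natIter (n - 1).toNat "DRU" 1 n rfl,
        (natIter_eq_alt (n - 1).toNat).1, hk]
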